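-- pv_equiv track=rewrite | github.com/Elizaveta75/2021-python | ИС-31Б/Козлова/1_lab.py | fun_gen
-- ===== SOURCE A (Python) =====
-- def fun_gen(x):
--     y = 1
--     for i in range(x):
--         if i in (0,1):
--             yield 1
--         else:
--             y = y*i
--             yield y
-- ===== SOURCE B (Python) =====
-- def _fact(n):
--     r = 1
--     for k in range(2, n + 1):
--         r *= k
--     return r
--
-- def fun_gen(x):
--     for i in range(x):
--         yield _fact(i)
-- ===== Notes on version B (the rewrite author's own statement) =====
-- stated objective: idiomatic
-- what changed: B drops the running accumulator y and the (0,1) branch and yields the factorial of each index, recomputed from scratch per element by a helper.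
import Mathlib
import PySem

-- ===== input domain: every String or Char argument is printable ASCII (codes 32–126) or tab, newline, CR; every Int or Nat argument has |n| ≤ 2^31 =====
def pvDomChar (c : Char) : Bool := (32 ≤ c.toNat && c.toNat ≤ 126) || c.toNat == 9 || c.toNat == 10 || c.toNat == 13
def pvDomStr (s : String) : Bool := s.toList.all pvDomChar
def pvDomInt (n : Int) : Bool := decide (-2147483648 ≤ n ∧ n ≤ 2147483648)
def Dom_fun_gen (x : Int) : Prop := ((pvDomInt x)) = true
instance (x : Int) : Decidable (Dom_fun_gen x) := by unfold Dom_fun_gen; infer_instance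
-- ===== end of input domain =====

-- B replaces A's running-product accumulator by an independent from-scratch factorial per index (idiomatic; not faster).

-- ===== PORT A =====
-- for i in range(x): if i in (0,1): yield 1 else: y = y*i; yield y
def fun_gen (x : Int) : List Int :=
  ((PySem.List.pyRange 0 x 1).foldl
      (fun (st : Int × List Int) i =>
        if i = 0 ∨ i = 1 then (st.1, st.2 ++ [1])
        else (st.1 * i, st.2 ++ [st.1 * i]))
      (1, [])).2

-- ===== PORT B =====
def pvFact (n : Int) : Int :=
  (PySem.List.pyRange 2 (n + 1) 1).foldl (fun r k => r * k) 1

def fun_gen_alt (x : Int) : List Int :=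
  (PySem.List.pyRange 0 x 1).map pvFact

-- ===== PRECONDITION & SPEC =====
def Spec_fun_gen (x : Int) (out : List Int) : Prop := out = fun_gen_alt x
instance (x : Int) (out : List Int) : Decidable (Spec_fun_gen x out) := by unfold Spec_fun_gen; infer_instance

-- ===== CLAIM (what is proved, stated in full; the proofs are below) =====
def Claim_equal_fun_gen : Prop := ∀ (x : Int), Dom_fun_gen x → Spec_fun_gen x (fun_gen x)

-- ===== LEMMAS AND PROOFS =====
theorem pvFact_step (n : Int) (h : 2 ≤ n) : pvFact n = n * pvFact (n - 1) := by
  unfold pvFact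
  have h1 : (2 : Int) ≤ n := h
  have h2 : n - 1 + 1 = n := by ring
  rw [h2, PySem.List.pyRange_one_succ_right h1, List.foldl_append]
  simp [List.foldl, mul_comm]

theorem pvFact_small (n : Int) (h : n < 2) : pvFact n = 1 := by
  unfold pvFact
  rw [PySem.List.pyRange_one_eq_nil (by omega)]
  rfl

theorem fun_gen_loop (n : Nat) :
    (PySem.List.pyRange 0 (n : Int) 1).foldl
      (fun (st : Int × List Int) i =>
        if i = 0 ∨ i = 1 then (st.1, st.2 ++ [1])
        else (st.1 * i, st.2 ++ [st.1 * i]))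
      (1, [])
    = (pvFact ((n : Int) - 1), (PySem.List.pyRange 0 (n : Int) 1).map pvFact) := by
  induction n with
  | zero =>
      simp [PySem.List.pyRange_one_eq_nil]
      rw [pvFact]; norm_num
  | succ n ih =>
      have h0 : (0 : Int) ≤ (n : Int) := by positivity
      have hsp : ((n + 1 : Nat) : Int) = (n : Int) + 1 := by push_cast; ring
      rw [hsp, PySem.List.pyRange_one_succ_right h0, List.foldl_append, ih, List.map_append]
      by_cases hc : n = 0 ∨ n = 1
      · have h1 : pvFact ((n : Int) - 1) = 1 := pvFact_small _ (by omega)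
        have h2 : pvFact (n : Int) = 1 := pvFact_small _ (by omega)
        have h3 : pvFact ((n : Int) + 1 - 1) = pvFact (n : Int) := by norm_num
        have hci : (n : Int) = 0 ∨ (n : Int) = 1 := by omega
        have h4 : pvFact (↑n + 1 - 1) = (1:Int) := by rw [h3, h2]
        simp only [List.foldl, if_pos hci, h4, List.map_cons, List.map_nil, h2, h1]
      · have h2 : (2 : Int) ≤ (n : Int) := by omega
        have hci : ¬((n : Int) = 0 ∨ (n : Int) = 1) := by omega
        have h3 : pvFact ((n : Int) + 1 - 1) = (n : Int) * pvFact ((n : Int) - 1) := by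
          norm_num [pvFact_step _ h2]
        simp only [List.foldl, if_neg hci, h3, List.map_cons, List.map_nil]
        rw [Prod.mk.injEq]
        refine ⟨by ring, ?_⟩
        congr 1
        rw [pvFact_step _ h2]
        ring_nf

-- ===== VERDICT (by name: the statement is the Claim_ definition above) =====
theorem fun_gen_spec : Claim_equal_fun_gen := by
  intro x _
  unfold Spec_fun_gen fun_gen fun_gen_alt
  by_cases h : x ≤ 0
  · rw [PySem.List.pyRange_one_eq_nil h]; simp
  · have hx : x = ((x.toNat : Nat) : Int) := by omega
    rw [hx, fun_gen_loop]
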